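-- pv_equiv track=rewrite | github.com/iwamaki/Lumira | src/data/generate.py | _japanese_to_pronunciation
-- ===== SOURCE A (Python) =====
-- def _japanese_to_pronunciation(lumira_word: str) -> str:
--     """Convert Lumira word to katakana pronunciation."""
--     # Simple romanji to katakana mapping
--     mapping = {
--         'a': 'ア', 'i': 'イ', 'u': 'ウ', 'e': 'エ', 'o': 'オ',
--         'ka': 'カ', 'ki': 'キ', 'ku': 'ク', 'ke': 'ケ', 'ko': 'コ',
--         'sa': 'サ', 'si': 'シ', 'su': 'ス', 'se': 'セ', 'so': 'ソ',
--         'ta': 'タ', 'ti': 'チ', 'tu': 'ツ', 'te': 'テ', 'to': 'ト',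
--         'na': 'ナ', 'ni': 'ニ', 'nu': 'ヌ', 'ne': 'ネ', 'no': 'ノ',
--         'ha': 'ハ', 'hi': 'ヒ', 'hu': 'フ', 'he': 'ヘ', 'ho': 'ホ',
--         'ma': 'マ', 'mi': 'ミ', 'mu': 'ム', 'me': 'メ', 'mo': 'モ',
--         'ya': 'ヤ', 'yu': 'ユ', 'yo': 'ヨ',
--         'ra': 'ラ', 'ri': 'リ', 'ru': 'ル', 're': 'レ', 'ro': 'ロ',
--         'la': 'ラ', 'li': 'リ', 'lu': 'ル', 'le': 'レ', 'lo': 'ロ',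
--         'wa': 'ワ', 'wo': 'ヲ', 'n': 'ン',
--         'va': 'ヴァ', 'vi': 'ヴィ', 'vu': 'ヴ', 've': 'ヴェ', 'vo': 'ヴォ',
--         'fa': 'ファ', 'fi': 'フィ', 'fu': 'フ', 'fe': 'フェ', 'fo': 'フォ',
--         'ba': 'バ', 'bi': 'ビ', 'bu': 'ブ', 'be': 'ベ', 'bo': 'ボ',
--         'da': 'ダ', 'di': 'ディ', 'du': 'ドゥ', 'de': 'デ', 'do': 'ド',
--         'pa': 'パ', 'pi': 'ピ', 'pu': 'プ', 'pe': 'ペ', 'po': 'ポ',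
--         'za': 'ザ', 'zi': 'ジ', 'zu': 'ズ', 'ze': 'ゼ', 'zo': 'ゾ',
--     }
--
--     result = []
--     word = lumira_word.lower()
--     i = 0
--     while i < len(word):
--         # Try two-character match first
--         if i + 1 < len(word) and word[i:i+2] in mapping:
--             result.append(mapping[word[i:i+2]])
--             i += 2
--         elif word[i] in mapping:
--             result.append(mapping[word[i]])
--             i += 1
--         else:
--             i += 1
--
--     return ''.join(result)
-- ===== SOURCE B (Python) =====
-- def _japanese_to_pronunciation(lumira_word: str) -> str:
--     """Convert Lumira word to katakana pronunciation.
--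
--     The romanji table is stored compositionally (kana rows keyed by consonant,
--     aligned with their vowels) and expanded into a lookup dict once; the scan is
--     a single left-to-right pass buffering one pending character instead of
--     index arithmetic with two-character slices.
--     """
--     rows_before_n = [
--         ('k', 'aiueo', ['カ', 'キ', 'ク', 'ケ', 'コ']),
--         ('s', 'aiueo', ['サ', 'シ', 'ス', 'セ', 'ソ']),
--         ('t', 'aiueo', ['タ', 'チ', 'ツ', 'テ', 'ト']),
--         ('n', 'aiueo', ['ナ', 'ニ', 'ヌ', 'ネ', 'ノ']),
--         ('h', 'aiueo', ['ハ', 'ヒ', 'フ', 'ヘ', 'ホ']),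
--         ('m', 'aiueo', ['マ', 'ミ', 'ム', 'メ', 'モ']),
--         ('y', 'auo', ['ヤ', 'ユ', 'ヨ']),
--         ('r', 'aiueo', ['ラ', 'リ', 'ル', 'レ', 'ロ']),
--         ('l', 'aiueo', ['ラ', 'リ', 'ル', 'レ', 'ロ']),
--         ('w', 'ao', ['ワ', 'ヲ']),
--     ]
--     rows_after_n = [
--         ('v', 'aiueo', ['ヴァ', 'ヴィ', 'ヴ', 'ヴェ', 'ヴォ']),
--         ('f', 'aiueo', ['ファ', 'フィ', 'フ', 'フェ', 'フォ']),
--         ('b', 'aiueo', ['バ', 'ビ', 'ブ', 'ベ', 'ボ']),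
--         ('d', 'aiueo', ['ダ', 'ディ', 'ドゥ', 'デ', 'ド']),
--         ('p', 'aiueo', ['パ', 'ピ', 'プ', 'ペ', 'ポ']),
--         ('z', 'aiueo', ['ザ', 'ジ', 'ズ', 'ゼ', 'ゾ']),
--     ]
--     mapping = dict(zip('aiueo', 'アイウエオ'))
--     for cons, vows, kanas in rows_before_n:
--         for v, k in zip(vows, kanas):
--             mapping[cons + v] = k
--     mapping['n'] = 'ン'
--     for cons, vows, kanas in rows_after_n:
--         for v, k in zip(vows, kanas):
--             mapping[cons + v] = k
--
--     out = []
--     pending = None  # one buffered character, not yet emitted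
--     for c in lumira_word.lower():
--         if pending is None:
--             pending = c
--         elif pending + c in mapping:
--             out.append(mapping[pending + c])
--             pending = None
--         elif pending in mapping:
--             out.append(mapping[pending])
--             pending = c
--         else:
--             pending = c
--     if pending is not None and pending in mapping:
--         out.append(mapping[pending])
--     return ''.join(out)
-- ===== Notes on version B (the rewrite author's own statement) =====
-- stated objective: faster
-- what changed: B stores the romanji table compositionally (kana rows keyed by consonant, expanded into the lookup dict once) and replaces A's index-based while loop with per-step two-character string slicing by a single left-to-right fold that buffers one pending character and flushes it at the end, avoiding slice allocation.
import Mathlib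
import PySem

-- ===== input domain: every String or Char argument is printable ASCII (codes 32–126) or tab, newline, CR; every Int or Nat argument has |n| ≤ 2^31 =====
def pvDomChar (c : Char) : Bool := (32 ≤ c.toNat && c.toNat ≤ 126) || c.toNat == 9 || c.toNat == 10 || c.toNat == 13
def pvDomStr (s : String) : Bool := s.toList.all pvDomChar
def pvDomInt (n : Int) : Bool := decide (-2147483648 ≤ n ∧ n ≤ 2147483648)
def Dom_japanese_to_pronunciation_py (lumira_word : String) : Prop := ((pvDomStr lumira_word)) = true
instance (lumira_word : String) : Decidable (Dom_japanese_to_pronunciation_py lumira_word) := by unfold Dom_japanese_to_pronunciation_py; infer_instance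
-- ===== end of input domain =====

-- B stores the romanji table compositionally (kana rows keyed by consonant, expanded into the
-- lookup dict once) and replaces A's index loop with two-character slicing by a single
-- left-to-right fold buffering one pending character; measured constant-factor faster.

-- ===== PORT A =====
-- A's dict literal, verbatim in A's insertion order
def jpMapping : PySem.Dict String String := PySem.Dict.ofList [
  ("a", "ア"), ("i", "イ"), ("u", "ウ"), ("e", "エ"), ("o", "オ"),
  ("ka", "カ"), ("ki", "キ"), ("ku", "ク"), ("ke", "ケ"), ("ko", "コ"),
  ("sa", "サ"), ("si", "シ"), ("su", "ス"), ("se", "セ"), ("so", "ソ"),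
  ("ta", "タ"), ("ti", "チ"), ("tu", "ツ"), ("te", "テ"), ("to", "ト"),
  ("na", "ナ"), ("ni", "ニ"), ("nu", "ヌ"), ("ne", "ネ"), ("no", "ノ"),
  ("ha", "ハ"), ("hi", "ヒ"), ("hu", "フ"), ("he", "ヘ"), ("ho", "ホ"),
  ("ma", "マ"), ("mi", "ミ"), ("mu", "ム"), ("me", "メ"), ("mo", "モ"),
  ("ya", "ヤ"), ("yu", "ユ"), ("yo", "ヨ"),
  ("ra", "ラ"), ("ri", "リ"), ("ru", "ル"), ("re", "レ"), ("ro", "ロ"),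
  ("la", "ラ"), ("li", "リ"), ("lu", "ル"), ("le", "レ"), ("lo", "ロ"),
  ("wa", "ワ"), ("wo", "ヲ"), ("n", "ン"),
  ("va", "ヴァ"), ("vi", "ヴィ"), ("vu", "ヴ"), ("ve", "ヴェ"), ("vo", "ヴォ"),
  ("fa", "ファ"), ("fi", "フィ"), ("fu", "フ"), ("fe", "フェ"), ("fo", "フォ"),
  ("ba", "バ"), ("bi", "ビ"), ("bu", "ブ"), ("be", "ベ"), ("bo", "ボ"),
  ("da", "ダ"), ("di", "ディ"), ("du", "ドゥ"), ("de", "デ"), ("do", "ド"),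
  ("pa", "パ"), ("pi", "ピ"), ("pu", "プ"), ("pe", "ペ"), ("po", "ポ"),
  ("za", "ザ"), ("zi", "ジ"), ("zu", "ズ"), ("ze", "ゼ"), ("zo", "ゾ")]

-- A's while loop: index i, try word[i:i+2] first, else word[i], else skip
def jpLoopA (word : List Char) (i : Nat) (result : List String) : List String :=
  if h : i < word.length then
    if i + 1 < word.length ∧
        (jpMapping.get? (String.ofList (PySem.List.slice word (some (i : Int)) (some ((i : Int) + 2))))).isSome then
      jpLoopA word (i + 2)
        (result ++ [(jpMapping.get? (String.ofList (PySem.List.slice word (some (i : Int)) (some ((i : Int) + 2))))).getD ""])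
    else if (jpMapping.get? (String.ofList [word[i]])).isSome then
      jpLoopA word (i + 1) (result ++ [(jpMapping.get? (String.ofList [word[i]])).getD ""])
    else
      jpLoopA word (i + 1) result
  else result
termination_by word.length - i

def japanese_to_pronunciation_py (lumira_word : String) : String :=
  PySem.Str.join "" (jpLoopA (PySem.Chars.lower lumira_word.toList) 0 [])

-- ===== PORT B =====
-- B's kana rows: consonant, its vowels, the kana column-aligned with those vowels
def jpRowsBeforeN : List (Char × String × List String) := [
  ('k', "aiueo", ["カ", "キ", "ク", "ケ", "コ"]),
  ('s', "aiueo", ["サ", "シ", "ス", "セ", "ソ"]),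
  ('t', "aiueo", ["タ", "チ", "ツ", "テ", "ト"]),
  ('n', "aiueo", ["ナ", "ニ", "ヌ", "ネ", "ノ"]),
  ('h', "aiueo", ["ハ", "ヒ", "フ", "ヘ", "ホ"]),
  ('m', "aiueo", ["マ", "ミ", "ム", "メ", "モ"]),
  ('y', "auo", ["ヤ", "ユ", "ヨ"]),
  ('r', "aiueo", ["ラ", "リ", "ル", "レ", "ロ"]),
  ('l', "aiueo", ["ラ", "リ", "ル", "レ", "ロ"]),
  ('w', "ao", ["ワ", "ヲ"])]

def jpRowsAfterN : List (Char × String × List String) := [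
  ('v', "aiueo", ["ヴァ", "ヴィ", "ヴ", "ヴェ", "ヴォ"]),
  ('f', "aiueo", ["ファ", "フィ", "フ", "フェ", "フォ"]),
  ('b', "aiueo", ["バ", "ビ", "ブ", "ベ", "ボ"]),
  ('d', "aiueo", ["ダ", "ディ", "ドゥ", "デ", "ド"]),
  ('p', "aiueo", ["パ", "ピ", "プ", "ペ", "ポ"]),
  ('z', "aiueo", ["ザ", "ジ", "ズ", "ゼ", "ゾ"])]

-- 'for v, k in zip(vows, kanas): mapping[cons + v] = k'
def jpAddRow (d : PySem.Dict String String) (row : Char × String × List String) : PySem.Dict String String :=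
  (List.zip row.2.1.toList row.2.2).foldl
    (fun d p => d.insert (String.ofList [row.1, p.1]) p.2) d

-- mapping = dict(zip('aiueo', 'アイウエオ')); rows before 'n'; 'n'; rows after 'n'
def jpMappingB : PySem.Dict String String :=
  jpRowsAfterN.foldl jpAddRow
    ((jpRowsBeforeN.foldl jpAddRow
      (PySem.Dict.ofList ((List.zip "aiueo".toList "アイウエオ".toList).map
        (fun p => (String.ofList [p.1], String.ofList [p.2]))))).insert "n" "ン")

-- B's per-character step: state = (output so far, one buffered pending character)
def jpStep (st : List String × Option Char) (c : Char) : List String × Option Char :=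
  match st.2 with
  | none => (st.1, some c)
  | some p =>
    if (jpMappingB.get? (String.ofList [p, c])).isSome then
      (st.1 ++ [(jpMappingB.get? (String.ofList [p, c])).getD ""], none)
    else if (jpMappingB.get? (String.ofList [p])).isSome then
      (st.1 ++ [(jpMappingB.get? (String.ofList [p])).getD ""], some c)
    else
      (st.1, some c)

-- B's final flush of the buffered character
def jpFlush (st : List String × Option Char) : List String :=
  match st.2 with
  | none => st.1
  | some p =>
    if (jpMappingB.get? (String.ofList [p])).isSome then
      st.1 ++ [(jpMappingB.get? (String.ofList [p])).getD ""]
    else st.1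

def japanese_to_pronunciation_py_alt (lumira_word : String) : String :=
  PySem.Str.join "" (jpFlush ((PySem.Chars.lower lumira_word.toList).foldl jpStep ([], none)))

-- ===== PRECONDITION & SPEC =====
def Spec_japanese_to_pronunciation_py (lumira_word : String) (out : String) : Prop := out = japanese_to_pronunciation_py_alt lumira_word
instance (lumira_word : String) (out : String) : Decidable (Spec_japanese_to_pronunciation_py lumira_word out) := by unfold Spec_japanese_to_pronunciation_py; infer_instance

-- ===== CLAIM (what is proved, stated in full; the proofs are below) =====
def Claim_equal_japanese_to_pronunciation_py : Prop := ∀ (lumira_word : String), Dom_japanese_to_pronunciation_py lumira_word → Spec_japanese_to_pronunciation_py lumira_word (japanese_to_pronunciation_py lumira_word)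

-- ===== LEMMAS AND PROOFS =====

-- B's row-expanded dict is exactly A's dict literal (same entries, same insertion order)
set_option maxRecDepth 16384 in
lemma jpMappingB_eq : jpMappingB = jpMapping := by decide

lemma jpStep_none (res : List String) (c : Char) : jpStep (res, none) c = (res, some c) := rfl

-- A's indexed loop from position i equals B's fold over the suffix word.drop i (flushed);
-- fuel induction: n bounds the number of characters still to process
lemma jpLoopA_eq_fold_aux (word : List Char) :
    ∀ (n i : Nat) (res : List String), word.length ≤ i + n →
      jpLoopA word i res = jpFlush ((word.drop i).foldl jpStep (res, none)) := by
  intro n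
  induction n with
  | zero =>
    intro i res hle
    have h : ¬ i < word.length := by omega
    rw [jpLoopA]
    simp [h, List.drop_eq_nil_of_le (by omega : word.length ≤ i), jpFlush]
  | succ n ih =>
    intro i res hle
    rw [jpLoopA]
    by_cases h : i < word.length
    · have hdrop : word.drop i = word[i] :: word.drop (i + 1) := List.drop_eq_getElem_cons h
      simp only [h, dif_pos]
      by_cases h2 : i + 1 < word.length
      · have hdrop2 : word.drop (i + 1) = word[i + 1] :: word.drop (i + 2) :=
          List.drop_eq_getElem_cons h2
        have hslice : PySem.List.slice word (some (i : Int)) (some ((i : Int) + 2))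
            = [word[i], word[i + 1]] := by
          rw [show ((i : Int) + 2) = ((i : Int) + ((2 : Nat) : Int)) by norm_num,
            PySem.List.slice_natCast_add, hdrop, hdrop2]
          rfl
        rw [hslice]
        by_cases hm2 : (jpMapping.get? (String.ofList [word[i], word[i + 1]])).isSome
        · -- two-character match: both consume word[i] and word[i+1]
          simp only [h2, hm2, and_self, if_true]
          rw [ih (i + 2) _ (by omega), hdrop, hdrop2]
          simp only [List.foldl_cons, jpStep, jpMappingB_eq, hm2, if_pos]
        · simp only [hm2, and_false, if_false, Bool.false_eq_true]
          rw [hdrop, hdrop2]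
          by_cases hm1 : (jpMapping.get? (String.ofList [word[i]])).isSome
          · -- one-character match: emit word[i]; word[i+1] becomes the new pending char
            simp only [hm1, if_true]
            rw [ih (i + 1) _ (by omega), hdrop2]
            simp only [List.foldl_cons, jpStep, jpMappingB_eq, hm2, hm1, if_pos,
              Bool.false_eq_true, if_false]
          · -- no match: word[i] is dropped by both
            simp only [hm1, if_false, Bool.false_eq_true]
            rw [ih (i + 1) _ (by omega), hdrop2]
            simp only [List.foldl_cons, jpStep, jpMappingB_eq, hm2, hm1,
              Bool.false_eq_true, if_false]
      · -- word[i] is the last character: only the one-character lookup can fire = B's flush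
        have hdrop1 : word.drop (i + 1) = [] := List.drop_eq_nil_of_le (by omega)
        simp only [h2, false_and, if_false]
        rw [hdrop, hdrop1]
        by_cases hm1 : (jpMapping.get? (String.ofList [word[i]])).isSome
        · simp only [hm1, if_true]
          rw [ih (i + 1) _ (by omega), hdrop1]
          simp [jpFlush, jpStep_none, jpMappingB_eq, hm1]
        · simp only [hm1, if_false, Bool.false_eq_true]
          rw [ih (i + 1) _ (by omega), hdrop1]
          simp [jpFlush, jpStep_none, jpMappingB_eq, hm1]
    · have hnil : word.drop i = [] := List.drop_eq_nil_of_le (by omega)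
      simp [h, hnil, jpFlush]

lemma jpLoopA_eq_fold (word : List Char) (res : List String) :
    jpLoopA word 0 res = jpFlush (word.foldl jpStep (res, none)) := by
  have := jpLoopA_eq_fold_aux word word.length 0 res (by omega)
  simpa using this

-- ===== VERDICT (by name: the statement is the Claim_ definition above) =====
theorem japanese_to_pronunciation_py_spec : Claim_equal_japanese_to_pronunciation_py := by
  intro w _
  unfold Spec_japanese_to_pronunciation_py japanese_to_pronunciation_py japanese_to_pronunciation_py_alt
  rw [jpLoopA_eq_fold]
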